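-- pv_equiv track=rewrite | github.com/mr-mahmood/Quera-Solution | Codes/easy/221463/221463_1.py | check
-- ===== SOURCE A (Python) =====
-- def check(board, i, j, name, n, m):
--     i_temp = i
--     j_temp = j
--     flag = False
--     for i in range(2):
--         if i == 0:
--             c = 1
--             while i_temp-c >= 0 and j_temp-c >= 0:
--                 if board[i_temp-c][j_temp-c] == name:
--                     flag = True
--                     break
--                 c += 1
--         if i == 1:
--             c = 1
--             while i_temp+c < n  and j_temp+c < m:
--                 if board[i_temp+c][j_temp+c] == name:
--                     flag = True
--                     break
--                 c += 1
--     return flag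
-- ===== SOURCE B (Python) =====
-- def check(board, i, j, name, n, m):
--     c = 1
--     while (i - c >= 0 and j - c >= 0) or (i + c < n and j + c < m):
--         if i - c >= 0 and j - c >= 0 and board[i - c][j - c] == name:
--             return True
--         if i + c < n and j + c < m and board[i + c][j + c] == name:
--             return True
--         c += 1
--     return False
-- ===== Notes on version B (the rewrite author's own statement) =====
-- stated objective: simpler
-- what changed: One expanding-radius loop interleaves the up-left and down-right diagonal walks with early return, replacing the range(2) driver, the flag variable and the two sequential while loops.
import Mathlib
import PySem

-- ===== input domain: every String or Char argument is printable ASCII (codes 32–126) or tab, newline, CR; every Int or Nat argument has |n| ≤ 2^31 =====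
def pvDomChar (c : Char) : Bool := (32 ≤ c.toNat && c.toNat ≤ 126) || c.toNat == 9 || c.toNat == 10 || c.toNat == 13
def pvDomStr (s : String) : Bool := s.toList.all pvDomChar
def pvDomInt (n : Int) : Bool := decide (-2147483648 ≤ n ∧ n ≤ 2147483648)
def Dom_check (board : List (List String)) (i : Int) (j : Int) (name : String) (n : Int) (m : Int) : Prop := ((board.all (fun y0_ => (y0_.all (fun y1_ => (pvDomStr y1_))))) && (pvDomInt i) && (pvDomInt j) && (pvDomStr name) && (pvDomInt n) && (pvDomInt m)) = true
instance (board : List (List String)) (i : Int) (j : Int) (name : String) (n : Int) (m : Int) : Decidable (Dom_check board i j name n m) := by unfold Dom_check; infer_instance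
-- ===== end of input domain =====

-- B replaces A's range(2) driver, flag variable and two sequential while loops by a
-- single expanding-radius loop that interleaves the two diagonal walks and returns early.
-- The while loops are ported with an explicit Nat fuel that merely makes them total:
-- the initial fuel always suffices, so each port computes exactly its Python's value.

-- board[a][b] as Python computes it (negative wraparound, none = IndexError)
def pvCell (board : List (List String)) (a b : Int) : Option String :=
  (PySem.List.pyGet? board a).bind (fun row => PySem.List.pyGet? row b)

-- ===== PORT A =====
-- the i == 0 while loop: walk up-left from radius c
def checkUp (board : List (List String)) (iT jT : Int) (name : String) (c : Int) : Nat → Bool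
  | 0 => false
  | fuel + 1 =>
    if 0 ≤ iT - c ∧ 0 ≤ jT - c then
      if pvCell board (iT - c) (jT - c) = some name then true
      else checkUp board iT jT name (c + 1) fuel
    else false

-- the i == 1 while loop: walk down-right from radius c
def checkDown (board : List (List String)) (iT jT : Int) (name : String) (n m : Int) (c : Int) : Nat → Bool
  | 0 => false
  | fuel + 1 =>
    if iT + c < n ∧ jT + c < m then
      if pvCell board (iT + c) (jT + c) = some name then true
      else checkDown board iT jT name n m (c + 1) fuel
    else false

def check (board : List (List String)) (i : Int) (j : Int) (name : String) (n : Int) (m : Int) : Bool :=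
  let i_temp := i
  let j_temp := j
  let flag := false
  let flag := if checkUp board i_temp j_temp name 1 i_temp.toNat then true else flag
  let flag := if checkDown board i_temp j_temp name n m 1 (n - i_temp).toNat then true else flag
  flag

-- ===== PORT B =====
-- the single while loop of Source B, expanding radius c in both diagonal directions at once
def checkBoth (board : List (List String)) (i j : Int) (name : String) (n m : Int) (c : Int) : Nat → Bool
  | 0 => false
  | fuel + 1 =>
    if (0 ≤ i - c ∧ 0 ≤ j - c) ∨ (i + c < n ∧ j + c < m) then
      if (decide (0 ≤ i - c) && decide (0 ≤ j - c)) && decide (pvCell board (i - c) (j - c) = some name) then true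
      else if (decide (i + c < n) && decide (j + c < m)) && decide (pvCell board (i + c) (j + c) = some name) then true
      else checkBoth board i j name n m (c + 1) fuel
    else false

def check_alt (board : List (List String)) (i : Int) (j : Int) (name : String) (n : Int) (m : Int) : Bool :=
  checkBoth board i j name n m 1 (max i (n - i - 1)).toNat

-- ===== PRECONDITION & SPEC =====
-- Pre_ holds exactly when the Python A returns normally: each of its two diagonal
-- walks reaches a matching cell or its bound before any board access goes out of
-- range (outside Pre_, A raises IndexError).  Each conjunct says: a walk step at
-- radius k+1 that is inside the loop bound and is reached (no match at any earlier
-- radius) must be a valid board access; ranges of length |board|+1 resp. 2|board|+1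
-- suffice, since a longer matchless walk of valid accesses is impossible.
def Pre_check (board : List (List String)) (i : Int) (j : Int) (name : String) (n : Int) (m : Int) : Prop :=
  (∀ k ∈ List.range (board.length + 1),
    (k : Int) + 1 ≤ min i j →
    (∀ k' ∈ List.range k, pvCell board (i - ((k' : Int) + 1)) (j - ((k' : Int) + 1)) ≠ some name) →
    (pvCell board (i - ((k : Int) + 1)) (j - ((k : Int) + 1))).isSome = true) ∧
  (∀ k ∈ List.range (2 * board.length + 1),
    (i + ((k : Int) + 1) < n ∧ j + ((k : Int) + 1) < m) →
    (∀ k' ∈ List.range k, pvCell board (i + ((k' : Int) + 1)) (j + ((k' : Int) + 1)) ≠ some name) →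
    (pvCell board (i + ((k : Int) + 1)) (j + ((k : Int) + 1))).isSome = true)
instance (board : List (List String)) (i : Int) (j : Int) (name : String) (n : Int) (m : Int) : Decidable (Pre_check board i j name n m) := by unfold Pre_check; infer_instance

def pvWitness_check : List (List String) × Int × Int × String × Int × Int := ([["a"]], 0, 0, "a", 1, 1)

def Spec_check (board : List (List String)) (i : Int) (j : Int) (name : String) (n : Int) (m : Int) (out : Bool) : Prop := out = check_alt board i j name n m
instance (board : List (List String)) (i : Int) (j : Int) (name : String) (n : Int) (m : Int) (out : Bool) : Decidable (Spec_check board i j name n m out) := by unfold Spec_check; infer_instance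

-- ===== CLAIM (what is proved, stated in full; the proofs are below) =====
def Claim_equal_check : Prop := ∀ (board : List (List String)) (i : Int) (j : Int) (name : String) (n : Int) (m : Int), Dom_check board i j name n m → Pre_check board i j name n m → Spec_check board i j name n m (check board i j name n m)

-- ===== LEMMAS AND PROOFS =====

lemma checkUp_of_neg (board : List (List String)) (iT jT : Int) (name : String) (c : Int)
    (fuel : Nat) (h : ¬ (0 ≤ iT - c ∧ 0 ≤ jT - c)) : checkUp board iT jT name c fuel = false := by
  cases fuel with
  | zero => rfl
  | succ fuel => rw [checkUp, if_neg h]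

lemma checkDown_of_neg (board : List (List String)) (iT jT : Int) (name : String) (n m c : Int)
    (fuel : Nat) (h : ¬ (iT + c < n ∧ jT + c < m)) : checkDown board iT jT name n m c fuel = false := by
  cases fuel with
  | zero => rfl
  | succ fuel => rw [checkDown, if_neg h]

-- any sufficient fuel gives the same value (the loop exits before fuel runs out)
lemma checkUp_ext (board : List (List String)) (iT jT : Int) (name : String) :
    ∀ (f₁ f₂ : Nat) (c : Int), (iT - c + 1).toNat ≤ f₁ → (iT - c + 1).toNat ≤ f₂ →
      checkUp board iT jT name c f₁ = checkUp board iT jT name c f₂ := by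
  intro f₁
  induction f₁ with
  | zero =>
    intro f₂ c h1 _
    exact (checkUp_of_neg _ _ _ _ _ _ (by omega)).trans (checkUp_of_neg _ _ _ _ _ _ (by omega)).symm
  | succ f₁ ih =>
    intro f₂ c h1 h2
    cases f₂ with
    | zero =>
      exact (checkUp_of_neg _ _ _ _ _ _ (by omega)).trans (checkUp_of_neg _ _ _ _ _ _ (by omega)).symm
    | succ f₂ =>
      rw [checkUp, checkUp]
      by_cases hc : 0 ≤ iT - c ∧ 0 ≤ jT - c
      · rw [if_pos hc, if_pos hc]
        by_cases hm : pvCell board (iT - c) (jT - c) = some name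
        · rw [if_pos hm, if_pos hm]
        · rw [if_neg hm, if_neg hm]
          exact ih f₂ (c + 1) (by omega) (by omega)
      · rw [if_neg hc, if_neg hc]

lemma checkDown_ext (board : List (List String)) (iT jT : Int) (name : String) (n m : Int) :
    ∀ (f₁ f₂ : Nat) (c : Int), (n - iT - c + 1).toNat ≤ f₁ → (n - iT - c + 1).toNat ≤ f₂ →
      checkDown board iT jT name n m c f₁ = checkDown board iT jT name n m c f₂ := by
  intro f₁
  induction f₁ with
  | zero =>
    intro f₂ c h1 _
    exact (checkDown_of_neg _ _ _ _ _ _ _ _ (by omega)).trans (checkDown_of_neg _ _ _ _ _ _ _ _ (by omega)).symm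
  | succ f₁ ih =>
    intro f₂ c h1 h2
    cases f₂ with
    | zero =>
      exact (checkDown_of_neg _ _ _ _ _ _ _ _ (by omega)).trans (checkDown_of_neg _ _ _ _ _ _ _ _ (by omega)).symm
    | succ f₂ =>
      rw [checkDown, checkDown]
      by_cases hc : iT + c < n ∧ jT + c < m
      · rw [if_pos hc, if_pos hc]
        by_cases hm : pvCell board (iT + c) (jT + c) = some name
        · rw [if_pos hm, if_pos hm]
        · rw [if_neg hm, if_neg hm]
          exact ih f₂ (c + 1) (by omega) (by omega)
      · rw [if_neg hc, if_neg hc]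

-- the interleaved walk is the disjunction of the two one-direction walks
lemma checkBoth_eq_or (board : List (List String)) (i j : Int) (name : String) (n m : Int) :
    ∀ (fb fu fd : Nat) (c : Int),
      (max (i - c + 1) (n - i - c)).toNat ≤ fb → (i - c + 1).toNat ≤ fu → (n - i - c + 1).toNat ≤ fd →
      checkBoth board i j name n m c fb
        = (checkUp board i j name c fu || checkDown board i j name n m c fd) := by
  intro fb
  induction fb with
  | zero =>
    intro fu fd c hb _ _
    rw [checkUp_of_neg _ _ _ _ _ _ (by omega), checkDown_of_neg _ _ _ _ _ _ _ _ (by omega)]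
    rfl
  | succ fb ih =>
    intro fu fd c hb hu hd
    rw [checkBoth]
    by_cases hg : (0 ≤ i - c ∧ 0 ≤ j - c) ∨ (i + c < n ∧ j + c < m)
    · rw [if_pos hg]
      by_cases hup : ((decide (0 ≤ i - c) && decide (0 ≤ j - c)) && decide (pvCell board (i - c) (j - c) = some name)) = true
      · -- up-left match found at radius c
        obtain ⟨⟨h1, h2⟩, h3⟩ : (0 ≤ i - c ∧ 0 ≤ j - c) ∧ pvCell board (i - c) (j - c) = some name := by
          simp only [Bool.and_eq_true, decide_eq_true_eq] at hup
          exact ⟨⟨hup.1.1, hup.1.2⟩, hup.2⟩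
        obtain ⟨fu', rfl⟩ : ∃ fu', fu = fu' + 1 := ⟨fu - 1, by omega⟩
        rw [if_pos hup, checkUp, if_pos ⟨h1, h2⟩, if_pos h3, Bool.true_or]
      · rw [if_neg hup]
        by_cases hdown : ((decide (i + c < n) && decide (j + c < m)) && decide (pvCell board (i + c) (j + c) = some name)) = true
        · -- down-right match found at radius c
          obtain ⟨⟨h1, h2⟩, h3⟩ : (i + c < n ∧ j + c < m) ∧ pvCell board (i + c) (j + c) = some name := by
            simp only [Bool.and_eq_true, decide_eq_true_eq] at hdown
            exact ⟨⟨hdown.1.1, hdown.1.2⟩, hdown.2⟩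
          obtain ⟨fd', rfl⟩ : ∃ fd', fd = fd' + 1 := ⟨fd - 1, by omega⟩
          rw [if_pos hdown, checkDown, if_pos ⟨h1, h2⟩, if_pos h3, Bool.or_true]
        · -- no match at radius c: advance both walks one step
          rw [if_neg hdown, ih fu fd (c + 1) (by omega) (by omega) (by omega)]
          have eup : checkUp board i j name c fu = checkUp board i j name (c + 1) fu := by
            by_cases hc : 0 ≤ i - c ∧ 0 ≤ j - c
            · obtain ⟨fu', rfl⟩ : ∃ fu', fu = fu' + 1 := ⟨fu - 1, by omega⟩
              have hm : ¬ pvCell board (i - c) (j - c) = some name := by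
                intro hm
                exact hup (by simp only [Bool.and_eq_true, decide_eq_true_eq]; exact ⟨⟨hc.1, hc.2⟩, hm⟩)
              rw [checkUp, if_pos hc, if_neg hm]
              exact checkUp_ext _ _ _ _ fu' (fu' + 1) (c + 1) (by omega) (by omega)
            · rw [checkUp_of_neg _ _ _ _ _ _ hc, checkUp_of_neg _ _ _ _ _ _ (by omega)]
          have edown : checkDown board i j name n m c fd = checkDown board i j name n m (c + 1) fd := by
            by_cases hc : i + c < n ∧ j + c < m
            · obtain ⟨fd', rfl⟩ : ∃ fd', fd = fd' + 1 := ⟨fd - 1, by omega⟩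
              have hm : ¬ pvCell board (i + c) (j + c) = some name := by
                intro hm
                exact hdown (by simp only [Bool.and_eq_true, decide_eq_true_eq]; exact ⟨⟨hc.1, hc.2⟩, hm⟩)
              rw [checkDown, if_pos hc, if_neg hm]
              exact checkDown_ext _ _ _ _ _ _ fd' (fd' + 1) (c + 1) (by omega) (by omega)
            · rw [checkDown_of_neg _ _ _ _ _ _ _ _ hc, checkDown_of_neg _ _ _ _ _ _ _ _ (by omega)]
          rw [eup, edown]
    · rw [if_neg hg]
      rw [checkUp_of_neg _ _ _ _ _ _ (fun hc => hg (Or.inl hc)),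
          checkDown_of_neg _ _ _ _ _ _ _ _ (fun hc => hg (Or.inr hc))]
      rfl

-- ===== VERDICT (by name: the statement is the Claim_ definition above) =====
theorem check_spec : Claim_equal_check := by
  intro board i j name n m _ _
  show check board i j name n m = check_alt board i j name n m
  unfold check check_alt
  rw [checkBoth_eq_or board i j name n m _ i.toNat (n - i).toNat 1 (by omega) (by omega) (by omega)]
  cases h1 : checkUp board i j name 1 i.toNat <;>
    cases h2 : checkDown board i j name n m 1 (n - i).toNat <;> simp [h1, h2]
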